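-- pv_equiv track=rewrite | github.com/vincentnam/OS_data_interop_RCIS_2023 | matching.py | get_leaf
-- ===== SOURCE A (Python) =====
-- def get_leaf(node_list):
--     aux_json = {}
--
--     def merge(d1, d2):
--         for k in d2:
--             if k in d1 and isinstance(d1[k], dict) and isinstance(d2[k], dict):
--                 merge(d1[k], d2[k])
--             else:
--                 d1[k] = d2[k]
--
--     def create_dict_from_label(token_list):
--         aux = {}
--         token = token_list.pop(0)
--         if token_list:
--             aux[token] = create_dict_from_label(token_list)
--         else:
--             aux[token] = {}
--         return aux
--
--     for i in node_list:
--         merge(aux_json, create_dict_from_label(i.split("->")))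
--
--     def paths(tree, cur=""):
--         if not tree:
--             yield cur
--         else:
--             for n, s in tree.items():
--                 if cur == "":
--                     for path in paths(s, n):
--                         yield path
--                 else:
--                     for path in paths(s, cur + "->" + n):
--                         yield path
--
--     return list(paths(aux_json))
-- ===== SOURCE B (Python) =====
-- def get_leaf(node_list):
--     # Build the trie iteratively: walk token-by-token down one shared nested dict.
--     trie = {}
--     for s in node_list:
--         cur = trie
--         for tok in s.split("->"):
--             cur = cur.setdefault(tok, {})
--     # Enumerate root-to-leaf paths with an explicit stack (pre-order DFS).
--     out = []
--     stack = [(trie, "")]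
--     while stack:
--         sub, prefix = stack.pop()
--         if not sub:
--             out.append(prefix)
--         else:
--             for name, child in reversed(list(sub.items())):
--                 stack.append((child, name if prefix == "" else prefix + "->" + name))
--     return out
-- ===== Notes on version B (the rewrite author's own statement) =====
-- stated objective: alternative
-- what changed: Replaces the per-string build-a-fresh-nested-dict + recursive merge and the recursive generator with an iterative token-walk insert into one shared trie and an explicit-stack pre-order DFS (reverse-push to keep order).
import Mathlib
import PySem

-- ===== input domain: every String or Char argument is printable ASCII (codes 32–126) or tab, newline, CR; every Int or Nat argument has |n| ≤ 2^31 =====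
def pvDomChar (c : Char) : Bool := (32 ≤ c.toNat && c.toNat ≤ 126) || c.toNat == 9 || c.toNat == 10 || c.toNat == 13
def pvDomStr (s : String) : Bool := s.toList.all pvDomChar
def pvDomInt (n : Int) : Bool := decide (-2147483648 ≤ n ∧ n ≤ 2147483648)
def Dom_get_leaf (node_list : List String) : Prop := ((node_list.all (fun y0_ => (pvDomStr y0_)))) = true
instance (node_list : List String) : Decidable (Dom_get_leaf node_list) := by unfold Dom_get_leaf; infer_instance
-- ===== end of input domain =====

-- B rebuilds the trie by an iterative token-walk insert and lists leaves with an
-- explicit-stack DFS, instead of A's fresh-dict + recursive merge + recursive generator.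

-- A nested string-keyed dict (dict of dicts, insertion order kept):
-- `cons name child rest` = first entry maps `name` to the sub-dict `child`, `rest` = later entries.
inductive Trie where
  | nil : Trie
  | cons : String → Trie → Trie → Trie
deriving DecidableEq, Repr

-- size of a trie, used only as a termination measure
def sz : Trie → Nat
  | .nil => 1
  | .cons _ c r => 2 + sz c + sz r

-- ===== PORT A =====

-- create_dict_from_label: token_list.pop(0); one-entry dict {token: rest-trie or {}}
def createT : List String → Trie
  | [] => .nil   -- unreachable: str.split always returns a nonempty list
  | tok :: rest => .cons tok (if rest.isEmpty then Trie.nil else createT rest) .nil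

-- merge(d1, d2): for k in d2: if k in d1 merge sub-dicts in place, else d1[k] = d2[k].
-- (All values in these dicts are dicts, so the isinstance checks are always true.)
mutual
def mergeT : Trie → Trie → Trie
  | d1, .nil => d1
  | d1, .cons k sub rest => mergeT (mergeEntry d1 k sub) rest
termination_by d1 d2 => (sz d2, sz d1)
decreasing_by all_goals simp_wf <;> simp [sz] <;> omega
def mergeEntry : Trie → String → Trie → Trie
  | .nil, k, sub => .cons k sub .nil
  | .cons k' c r, k, sub =>
      if k' == k then .cons k' (mergeT c sub) r else .cons k' c (mergeEntry r k sub)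
termination_by d1 _ sub => (sz sub + 1, sz d1)
decreasing_by all_goals simp_wf <;> simp [sz] <;> omega
end

-- paths(tree, cur): empty dict yields cur, else recurse into each entry in order.
mutual
def pathsT (t : Trie) (cur : String) : List String :=
  match t with
  | .nil => [cur]
  | .cons n s rest => pathsItems (.cons n s rest) cur
def pathsItems (t : Trie) (cur : String) : List String :=
  match t with
  | .nil => []
  | .cons n s rest =>
      (if cur == "" then pathsT s n else pathsT s (cur ++ "->" ++ n)) ++ pathsItems rest cur
end

def get_leaf (node_list : List String) : List String :=
  pathsT (node_list.foldl (fun acc i => mergeT acc (createT ((PySem.Str.split? i "->").getD []))) .nil) ""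

-- ===== PORT B =====

-- cur = cur.setdefault(tok, {}) walk: descend into existing key, else insert new empty dict at the end.
def insertPath : Trie → List String → Trie
  | t, [] => t
  | .nil, tok :: rest => .cons tok (insertPath .nil rest) .nil
  | .cons k c r, tok :: rest =>
      if k == tok then .cons k (insertPath c rest) r else .cons k c (insertPath r (tok :: rest))
termination_by t toks => (toks.length, sz t)
decreasing_by all_goals simp_wf <;> simp [sz] <;> omega

-- the children of a node paired with their extended prefixes, in insertion order
def kidsT : Trie → String → List (Trie × String)
  | .nil, _ => []
  | .cons n c r, pfx => (c, if pfx == "" then n else pfx ++ "->" ++ n) :: kidsT r pfx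

-- stack weight, the termination measure of the DFS loop
def wtT : List (Trie × String) → Nat
  | [] => 0
  | (t, _) :: rest => sz t + 1 + wtT rest

theorem wtT_append (a b : List (Trie × String)) : wtT (a ++ b) = wtT a + wtT b := by
  induction a with
  | nil => simp [wtT]
  | cons h tl ih => obtain ⟨t, p⟩ := h; simp [wtT, ih] <;> omega

theorem wtT_kidsT (t : Trie) (pfx : String) : wtT (kidsT t pfx) ≤ sz t := by
  induction t generalizing pfx with
  | nil => simp [kidsT, wtT, sz]
  | cons n c r ihc ihr =>
      have := ihr pfx
      simp only [kidsT, wtT, sz]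
      omega

-- while stack: pop; empty node → emit prefix; else push children (reversed → head-first order kept)
def dfsT : List (Trie × String) → List String → List String
  | [], out => out
  | (t, pfx) :: rest, out =>
      match t with
      | .nil => dfsT rest (out ++ [pfx])
      | .cons n c r => dfsT (kidsT (.cons n c r) pfx ++ rest) out
termination_by stack _ => wtT stack
decreasing_by
  · simp [wtT]
  · have h1 := wtT_kidsT (Trie.cons n c r) pfx
    have h2 := wtT_append (kidsT (Trie.cons n c r) pfx) rest
    simp [wtT, sz] at *
    omega

def get_leaf_alt (node_list : List String) : List String :=
  dfsT [(node_list.foldl (fun acc s => insertPath acc ((PySem.Str.split? s "->").getD [])) .nil, "")] []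

-- ===== PRECONDITION & SPEC =====
def Spec_get_leaf (node_list : List String) (out : List String) : Prop := out = get_leaf_alt node_list
instance (node_list : List String) (out : List String) : Decidable (Spec_get_leaf node_list out) := by unfold Spec_get_leaf; infer_instance

-- ===== CLAIM (what is proved, stated in full; the proofs are below) =====
def Claim_equal_get_leaf : Prop := ∀ (node_list : List String), Dom_get_leaf node_list → Spec_get_leaf node_list (get_leaf node_list)

-- ===== LEMMAS AND PROOFS =====

theorem createT_cons (tok : String) (rest : List String) :
    createT (tok :: rest) = .cons tok (createT rest) .nil := by
  cases rest <;> simp [createT, List.isEmpty]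

theorem insertPath_nilToks (t : Trie) : insertPath t [] = t := by
  rw [insertPath.eq_def]

theorem insertPath_nilTrie (tok : String) (rest : List String) :
    insertPath .nil (tok :: rest) = .cons tok (insertPath .nil rest) .nil := by
  rw [insertPath.eq_def]

theorem insertPath_consTrie (k : String) (c r : Trie) (tok : String) (rest : List String) :
    insertPath (.cons k c r) (tok :: rest)
      = if k == tok then .cons k (insertPath c rest) r else .cons k c (insertPath r (tok :: rest)) := by
  rw [insertPath.eq_def]

theorem insertPath_nil (toks : List String) : insertPath .nil toks = createT toks := by
  induction toks with
  | nil => simp [insertPath_nilToks, createT]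
  | cons tok rest ih => rw [createT_cons, insertPath_nilTrie, ih]

theorem merge_createT (toks : List String) (t : Trie) :
    mergeT t (createT toks) = insertPath t toks := by
  induction toks generalizing t with
  | nil => simp [createT, mergeT, insertPath_nilToks]
  | cons tok rest ih =>
      rw [createT_cons, mergeT, mergeT]
      -- mergeEntry t tok (createT rest) = insertPath t (tok :: rest)
      induction t with
      | nil => rw [mergeEntry, insertPath_nilTrie, insertPath_nil]
      | cons k c r _ ihr =>
          rw [mergeEntry, insertPath_consTrie]
          by_cases h : k == tok
          · simp only [h, if_pos, ih]
          · simp only [h, if_neg, Bool.false_eq_true, not_false_iff, ihr]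

theorem same_trie (node_list : List String) :
    node_list.foldl (fun acc i => mergeT acc (createT ((PySem.Str.split? i "->").getD []))) .nil
      = node_list.foldl (fun acc s => insertPath acc ((PySem.Str.split? s "->").getD [])) .nil := by
  have : (fun (acc : Trie) (i : String) => mergeT acc (createT ((PySem.Str.split? i "->").getD [])))
       = (fun (acc : Trie) (s : String) => insertPath acc ((PySem.Str.split? s "->").getD [])) := by
    funext acc i; exact merge_createT _ _
  rw [this]

theorem pathsItems_eq_kids (t : Trie) (pfx : String) :
    pathsItems t pfx = (kidsT t pfx).flatMap (fun p => pathsT p.1 p.2) := by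
  induction t with
  | nil => simp [pathsItems, kidsT]
  | cons n c r _ ihr =>
      simp only [pathsItems, kidsT, List.flatMap_cons, ihr]
      by_cases h : pfx == "" <;> simp [h]

theorem dfsT_spec (stack : List (Trie × String)) (out : List String) :
    dfsT stack out = out ++ stack.flatMap (fun p => pathsT p.1 p.2) := by
  induction stack, out using dfsT.induct with
  | case1 out => simp [dfsT]
  | case2 pfx rest out ih =>
      rw [dfsT, ih]
      simp [pathsT]
  | case3 pfx rest out n c r ih =>
      rw [dfsT, ih]
      simp [pathsT, pathsItems_eq_kids]

-- ===== VERDICT (by name: the statement is the Claim_ definition above) =====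
theorem get_leaf_spec : Claim_equal_get_leaf := by
  intro node_list _
  unfold Spec_get_leaf get_leaf get_leaf_alt
  rw [same_trie, dfsT_spec]
  simp
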